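-- pv_equiv track=rewrite | github.com/chenye95/LeetCode_Progress | 1883_MinSkipsArriveOnTime.py | min_skips_one_list
-- ===== SOURCE A (Python) =====
-- from typing import List
--
-- def min_skips_one_list(distance: List[int], speed: int, hours_before: int) -> int:
--     """
--     :param distance: 1 <= len(distance) <= 1000, 1 <= distance[i] <= 1e5
--     :param speed: 1 <= speed <= 1e6
--     :param hours_before: 1 <= hours_before <= 1e7
--     :return: minimum skips to arrive at the meeting on time
--     """
--     # Scale all times by speed to avoid float
--     n = len(distance)
--     # time_with_skips[max_skips] minimum time to reach road_i with at most max_skips, scale up by speed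
--     time_with_skips: List[int] = [speed * hours_before] * (n + 1)
--     time_with_skips[0] = 0
--
--     # road_i is 1 indexed
--     for road_i, distance_i in enumerate(distance, 1):
--         for skip_count in range(road_i, 0, -1):
--             time_with_skips[skip_count] = min(time_with_skips[skip_count - 1] + distance_i,
--                                               (time_with_skips[skip_count] + distance_i + speed - 1) // speed * speed)
--         time_with_skips[0] = (time_with_skips[0] + distance_i + speed - 1) // speed * speed
--
--     for skip_count, time_to_arrive in enumerate(time_with_skips):
--         if time_to_arrive <= hours_before * speed:
--             return skip_count
--
--     return -1
-- ===== SOURCE B (Python) =====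
-- from typing import List
--
-- def min_skips_one_list(distance: List[int], speed: int, hours_before: int) -> int:
--     """Skips-major DP: try skip budgets 0, 1, 2, ... in turn; for each, build the
--     road-indexed row of minimum scaled times (x speed) from the previous budget's
--     row, and return the first budget whose full-trip time meets the deadline."""
--     n = len(distance)
--     budget = speed * hours_before
--     prev = None  # row for skips - 1 (unused while skips == 0)
--     for skips in range(n + 1):
--         # row[i] = minimum scaled time through the first i roads; budget marks
--         # cells with more skips than roads (no such cell beats the deadline scan).
--         row = [0 if skips == 0 else budget]
--         for i, d in enumerate(distance, 1):
--             if skips > i: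
--                 row.append(budget)
--             elif skips == 0:
--                 row.append((row[i - 1] + d + speed - 1) // speed * speed)
--             else:
--                 no_skip = (row[i - 1] + d + speed - 1) // speed * speed
--                 row.append(min(prev[i - 1] + d, no_skip))
--         if row[n] <= budget:
--             return skips
--         prev = row
--     return -1
-- ===== Notes on version B (the rewrite author's own statement) =====
-- stated objective: alternative
-- what changed: Replaces A's roads-major in-place 1D DP (array indexed by skip count, updated by a descending inner pass) with a skips-major DP that builds a road-indexed row per skip budget from the previous budget's row and returns at the first budget meeting the deadline, so only answer+2 rows are computed (same worst-case cost).
import Mathlib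
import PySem

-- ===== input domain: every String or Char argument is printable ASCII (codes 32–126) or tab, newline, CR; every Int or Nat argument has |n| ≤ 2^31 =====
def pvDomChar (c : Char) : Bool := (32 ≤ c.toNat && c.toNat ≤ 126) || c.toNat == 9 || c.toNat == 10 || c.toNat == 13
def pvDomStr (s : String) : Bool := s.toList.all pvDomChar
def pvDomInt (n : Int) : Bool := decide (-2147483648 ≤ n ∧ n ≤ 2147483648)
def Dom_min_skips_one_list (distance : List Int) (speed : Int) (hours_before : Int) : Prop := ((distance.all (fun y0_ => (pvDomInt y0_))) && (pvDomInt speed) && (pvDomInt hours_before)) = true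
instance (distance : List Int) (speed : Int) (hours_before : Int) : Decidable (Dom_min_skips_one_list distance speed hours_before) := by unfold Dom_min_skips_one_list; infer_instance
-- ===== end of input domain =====

-- B replaces A's roads-major in-place 1D DP (array indexed by skips, descending
-- inner pass) with a skips-major DP: rows indexed by road, built per skip budget
-- from the previous budget's row, stopping at the first budget that meets the
-- deadline, computing only answer+2 rows; objective: alternative (same worst-
-- case cost, different traversal order and early termination).

-- ===== PORT A =====
-- A's bottom-up DP: array of size n+1, outer loop over enumerate(distance, 1),
-- inner loop over range(road_i, 0, -1) updating in place, then a first-hit scan.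
def min_skips_one_list (distance : List Int) (speed : Int) (hours_before : Int) : Int :=
  let n := distance.length
  let init := PySem.List.pySetD (List.replicate (n + 1) (speed * hours_before)) 0 0
  let table := (PySem.List.enumerate distance 1).foldl
    (fun tbl p =>
      let road_i := p.1
      let d := p.2
      let tbl := (PySem.List.pyRange road_i 0 (-1)).foldl
        (fun t k =>
          PySem.List.pySetD t k
            (min (PySem.List.pyGetD t (k - 1) 0 + d)
                 (PySem.Int.floordiv (PySem.List.pyGetD t k 0 + d + speed - 1) speed * speed)))
        tbl
      PySem.List.pySetD tbl 0
        (PySem.Int.floordiv (PySem.List.pyGetD tbl 0 0 + d + speed - 1) speed * speed))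
    init
  -- final for-loop with early return, as a first-match fold
  match (PySem.List.enumerate table 0).foldl
      (fun acc p =>
        match acc with
        | some r => some r
        | none => if p.2 ≤ hours_before * speed then some p.1 else none)
      none with
  | some r => r
  | none => -1

-- ===== PORT B =====
-- Source B: skips-major DP; outer loop over skip budgets with early return, each
-- iteration builds the road-indexed row from the previous budget's row (prev).
-- Source B's initial 'prev = None' is never read (the skips = 0 row ignores prev);
-- ported as the empty list.
def min_skips_one_list_alt (distance : List Int) (speed : Int) (hours_before : Int) : Int :=
  let n := distance.length
  let budget := speed * hours_before
  let result := (List.range (n + 1)).foldl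
    (fun st skips =>
      match st.1 with
      | some _ => st
      | none =>
        let row := (PySem.List.enumerate distance 1).foldl
          (fun row p =>
            let i := p.1
            let d := p.2
            if (skips : Int) > i then row ++ [budget]
            else if skips = 0 then
              row ++ [PySem.Int.floordiv (PySem.List.pyGetD row (i - 1) 0 + d + speed - 1) speed * speed]
            else
              let noSkip := PySem.Int.floordiv (PySem.List.pyGetD row (i - 1) 0 + d + speed - 1) speed * speed
              row ++ [min (PySem.List.pyGetD st.2 (i - 1) 0 + d) noSkip])
          [if skips = 0 then 0 else budget]
        if PySem.List.pyGetD row (n : Int) 0 ≤ budget then (some (skips : Int), st.2) else (none, row))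
    ((none : Option Int), ([] : List Int))
  match result.1 with
  | some r => r
  | none => -1

-- ===== PRECONDITION & SPEC =====
-- Pre_ excludes exactly the inputs where A raises ZeroDivisionError:
-- speed = 0 with a nonempty distance list (the '// speed' is then executed).
def Pre_min_skips_one_list (distance : List Int) (speed : Int) (hours_before : Int) : Prop :=
  distance = [] ∨ speed ≠ 0
instance (distance : List Int) (speed : Int) (hours_before : Int) : Decidable (Pre_min_skips_one_list distance speed hours_before) := by unfold Pre_min_skips_one_list; infer_instance
def pvWitness_min_skips_one_list : List Int × Int × Int := ([1, 3, 2], 4, 2)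

def Spec_min_skips_one_list (distance : List Int) (speed : Int) (hours_before : Int) (out : Int) : Prop := out = min_skips_one_list_alt distance speed hours_before
instance (distance : List Int) (speed : Int) (hours_before : Int) (out : Int) : Decidable (Spec_min_skips_one_list distance speed hours_before out) := by unfold Spec_min_skips_one_list; infer_instance

-- ===== CLAIM (what is proved, stated in full; the proofs are below) =====
def Claim_equal_min_skips_one_list : Prop := ∀ (distance : List Int) (speed : Int) (hours_before : Int), Dom_min_skips_one_list distance speed hours_before → Pre_min_skips_one_list distance speed hours_before → Spec_min_skips_one_list distance speed hours_before (min_skips_one_list distance speed hours_before)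

-- ===== LEMMAS AND PROOFS =====

-- f(i, k): value of Source B's DP cell (min scaled time through first i roads with
-- the at-most-k-skips semantics; budget for untouched cells k > i).
def pvBest (dist : List Int) (speed budget : Int) : Nat → Nat → Int
  | 0, skips => if skips > 0 then budget else 0
  | r + 1, skips =>
    if skips > r + 1 then budget
    else
      let d := PySem.List.pyGetD dist (r : Int) 0
      let noSkip := PySem.Int.floordiv (pvBest dist speed budget r skips + d + speed - 1) speed * speed
      if skips = 0 then noSkip
      else min (pvBest dist speed budget r (skips - 1) + d) noSkip

def pvUpd (d speed : Int) (t : List Int) (k : Int) : List Int :=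
  PySem.List.pySetD t k
    (min (PySem.List.pyGetD t (k - 1) 0 + d)
         (PySem.Int.floordiv (PySem.List.pyGetD t k 0 + d + speed - 1) speed * speed))

def pvRow (dist : List Int) (speed budget : Int) (i N : Nat) : List Int :=
  (List.range (N + 1)).map (fun k => pvBest dist speed budget i k)

theorem pvUpd_length (d speed : Int) (t : List Int) (k : Int) :
    (pvUpd d speed t k).length = t.length := by
  simp [pvUpd, PySem.List.length_pySetD]

theorem pvInner_length (d speed : Int) : ∀ (m : Nat) (t : List Int),
    ((PySem.List.pyRange (m : Int) 0 (-1)).foldl (pvUpd d speed) t).length = t.length := by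
  intro m
  induction m with
  | zero => intro t; rw [Nat.cast_zero, PySem.List.pyRange_neg_one_eq_nil le_rfl]; rfl
  | succ m ih =>
    intro t
    have h1 : ((m + 1 : Nat) : Int) = (m : Int) + 1 := by push_cast; ring
    rw [h1, PySem.List.pyRange_neg_one_cons (by omega)]
    have h2 : (m : Int) + 1 - 1 = (m : Int) := by ring
    simp only [List.foldl_cons]
    rw [h2, ih, pvUpd_length]

theorem pvInner_get (d speed : Int) : ∀ (m : Nat) (t : List Int), m < t.length → ∀ (j : Nat),
    PySem.List.pyGetD ((PySem.List.pyRange (m : Int) 0 (-1)).foldl (pvUpd d speed) t) (j : Int) 0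
      = if 1 ≤ j ∧ j ≤ m then
          min (PySem.List.pyGetD t ((j : Int) - 1) 0 + d)
              (PySem.Int.floordiv (PySem.List.pyGetD t (j : Int) 0 + d + speed - 1) speed * speed)
        else PySem.List.pyGetD t (j : Int) 0 := by
  intro m
  induction m with
  | zero =>
    intro t _ j
    rw [Nat.cast_zero, PySem.List.pyRange_neg_one_eq_nil le_rfl]
    simp only [List.foldl_nil]
    rw [if_neg (by omega)]
  | succ m ih =>
    intro t hm j
    have h1 : ((m + 1 : Nat) : Int) = (m : Int) + 1 := by push_cast; ring
    rw [h1, PySem.List.pyRange_neg_one_cons (by omega), List.foldl_cons]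
    have h2 : (m : Int) + 1 - 1 = (m : Int) := by ring
    have hset : pvUpd d speed t ((m : Int) + 1)
        = PySem.List.pySetD t (((m + 1 : Nat) : Int))
            (min (PySem.List.pyGetD t ((m : Int)) 0 + d)
                 (PySem.Int.floordiv (PySem.List.pyGetD t ((m : Int) + 1) 0 + d + speed - 1) speed * speed)) := by
      rw [pvUpd, h1, h2]
    have hlen : m < (pvUpd d speed t ((m : Int) + 1)).length := by
      rw [pvUpd_length]; omega
    rw [h2, ih _ hlen j]
    have hmem : m + 1 < t.length := hm
    by_cases hc : 1 ≤ j ∧ j ≤ m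
    · rw [if_pos hc, if_pos (by omega : 1 ≤ j ∧ j ≤ m + 1)]
      have hj1 : (j : Int) - 1 = ((j - 1 : Nat) : Int) := by omega
      rw [hset, hj1, PySem.List.pyGetD_pySetD_natCast _ _ _ _ _ hmem,
          PySem.List.pyGetD_pySetD_natCast _ _ _ _ _ hmem,
          if_neg (by omega : ¬ j = m + 1), if_neg (by omega : ¬ j - 1 = m + 1)]
    · by_cases hj : j = m + 1
      · subst hj
        rw [if_neg (by omega), if_pos (by omega : 1 ≤ m + 1 ∧ m + 1 ≤ m + 1)]
        rw [hset, PySem.List.pyGetD_pySetD_natCast _ _ _ _ _ hmem, if_pos rfl]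
        have h3 : ((m + 1 : Nat) : Int) - 1 = (m : Int) := by push_cast; ring
        rw [h3, h1]
      · rw [if_neg hc, if_neg (by omega : ¬ (1 ≤ j ∧ j ≤ m + 1))]
        rw [hset, PySem.List.pyGetD_pySetD_natCast _ _ _ _ _ hmem, if_neg hj]

theorem pvRow_length (dist : List Int) (speed budget : Int) (i N : Nat) :
    (pvRow dist speed budget i N).length = N + 1 := by
  simp [pvRow]

theorem pvRow_get (dist : List Int) (speed budget : Int) (i N j : Nat) (hj : j < N + 1) :
    PySem.List.pyGetD (pvRow dist speed budget i N) (j : Int) 0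
      = pvBest dist speed budget i j := by
  rw [PySem.List.pyGetD_ofNat _ _ _ (by rw [pvRow_length]; exact hj)]
  simp [pvRow]

theorem pvBest_big (dist : List Int) (speed budget : Int) (i j : Nat) (h : i < j) :
    pvBest dist speed budget i j = budget := by
  cases i with
  | zero => rw [pvBest, if_pos (by omega)]
  | succ r => rw [pvBest, if_pos (by omega)]

theorem pvStep (dist : List Int) (speed budget : Int) (i : Nat) (hi : i < dist.length)
    (d : Int) (hd : d = PySem.List.pyGetD dist (i : Int) 0) :
    PySem.List.pySetD
      ((PySem.List.pyRange ((i : Int) + 1) 0 (-1)).foldl (pvUpd d speed)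
        (pvRow dist speed budget i dist.length)) 0
      (PySem.Int.floordiv
        (PySem.List.pyGetD
          ((PySem.List.pyRange ((i : Int) + 1) 0 (-1)).foldl (pvUpd d speed)
            (pvRow dist speed budget i dist.length)) 0 0 + d + speed - 1) speed * speed)
    = pvRow dist speed budget (i + 1) dist.length := by
  have hcast : ((i : Int) + 1) = ((i + 1 : Nat) : Int) := by push_cast; ring
  have hmrow : i + 1 < (pvRow dist speed budget i dist.length).length := by
    rw [pvRow_length]; omega
  have hinlen : ((PySem.List.pyRange ((i : Int) + 1) 0 (-1)).foldl (pvUpd d speed)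
      (pvRow dist speed budget i dist.length)).length = dist.length + 1 := by
    rw [hcast, pvInner_length, pvRow_length]
  have hget : ∀ (j : Nat),
      PySem.List.pyGetD ((PySem.List.pyRange ((i : Int) + 1) 0 (-1)).foldl (pvUpd d speed)
        (pvRow dist speed budget i dist.length)) (j : Int) 0
      = if 1 ≤ j ∧ j ≤ i + 1 then
          min (PySem.List.pyGetD (pvRow dist speed budget i dist.length) ((j : Int) - 1) 0 + d)
              (PySem.Int.floordiv
                (PySem.List.pyGetD (pvRow dist speed budget i dist.length) (j : Int) 0 + d + speed - 1)
                speed * speed)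
        else PySem.List.pyGetD (pvRow dist speed budget i dist.length) (j : Int) 0 := by
    intro j
    rw [hcast, pvInner_get d speed (i + 1) _ hmrow j]
  apply List.ext_getElem
  · rw [PySem.List.length_pySetD, hinlen, pvRow_length]
  · intro j hj1 hj2
    rw [pvRow_length] at hj2
    have hj0 : (0 : Int) = ((0 : Nat) : Int) := rfl
    have hsetlem := PySem.List.pyGetD_pySetD_natCast
      ((PySem.List.pyRange ((i : Int) + 1) 0 (-1)).foldl (pvUpd d speed)
        (pvRow dist speed budget i dist.length)) 0 j
      (PySem.Int.floordiv
        (PySem.List.pyGetD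
          ((PySem.List.pyRange ((i : Int) + 1) 0 (-1)).foldl (pvUpd d speed)
            (pvRow dist speed budget i dist.length)) 0 0 + d + speed - 1) speed * speed)
      (0 : Int) (by rw [hinlen]; omega)
    rw [← PySem.List.pyGetD_ofNat _ _ (0 : Int) (by rw [PySem.List.length_pySetD, hinlen]; omega),
        ← PySem.List.pyGetD_ofNat _ _ (0 : Int) (by rw [pvRow_length]; omega)]
    rw [Nat.cast_zero] at hsetlem
    rw [hsetlem, pvRow_get _ _ _ _ _ _ hj2]
    by_cases hjz : j = 0
    · subst hjz
      rw [if_pos rfl]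
      have h0 := hget 0
      rw [Nat.cast_zero] at h0
      rw [h0, if_neg (by omega)]
      have h0r := pvRow_get dist speed budget i dist.length 0 (by omega)
      rw [Nat.cast_zero] at h0r
      rw [h0r]
      rw [pvBest]
      rw [if_neg (by omega), if_pos rfl, ← hd]
    · rw [if_neg hjz, hget j]
      by_cases hc : 1 ≤ j ∧ j ≤ i + 1
      · rw [if_pos hc]
        obtain ⟨j', rfl⟩ : ∃ j', j = j' + 1 := ⟨j - 1, by omega⟩
        have hc1 : ((j' + 1 : Nat) : Int) - 1 = ((j' : Nat) : Int) := by push_cast; ring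
        rw [hc1, pvRow_get _ _ _ _ _ _ (by omega), pvRow_get _ _ _ _ _ _ hj2]
        rw [pvBest, if_neg (by omega), if_neg (by omega), ← hd]
        simp only [Nat.add_sub_cancel]
      · rw [if_neg hc, pvRow_get _ _ _ _ _ _ hj2]
        rw [pvBest_big _ _ _ _ _ (by omega), pvBest_big _ _ _ _ _ (by omega)]

theorem pvRow_zero (dist : List Int) (speed budget : Int) (N : Nat) :
    PySem.List.pySetD (List.replicate (N + 1) budget) 0 0
      = pvRow dist speed budget 0 N := by
  apply List.ext_getElem
  · rw [PySem.List.length_pySetD, pvRow_length, List.length_replicate]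
  · intro j hj1 hj2
    rw [pvRow_length] at hj2
    have hsetlem := PySem.List.pyGetD_pySetD_natCast
      (List.replicate (N + 1) budget) 0 j (0 : Int) (0 : Int)
      (by rw [List.length_replicate]; omega)
    rw [Nat.cast_zero] at hsetlem
    rw [← PySem.List.pyGetD_ofNat _ _ (0 : Int)
          (by rw [PySem.List.length_pySetD, List.length_replicate]; omega),
        ← PySem.List.pyGetD_ofNat _ _ (0 : Int) (by rw [pvRow_length]; omega)]
    have hrow := pvRow_get dist speed budget 0 N j hj2
    rw [hrow, hsetlem]
    by_cases hjz : j = 0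
    · subst hjz; rw [if_pos rfl, pvBest, if_neg (by omega)]
    · rw [if_neg hjz, PySem.List.pyGetD_ofNat _ _ _ (by rw [List.length_replicate]; omega),
          List.getElem_replicate, pvBest, if_pos (by omega)]

def pvAStep (speed : Int) (tbl : List Int) (p : Int × Int) : List Int :=
  let road_i := p.1
  let d := p.2
  let tbl := (PySem.List.pyRange road_i 0 (-1)).foldl
    (fun t k =>
      PySem.List.pySetD t k
        (min (PySem.List.pyGetD t (k - 1) 0 + d)
             (PySem.Int.floordiv (PySem.List.pyGetD t k 0 + d + speed - 1) speed * speed)))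
    tbl
  PySem.List.pySetD tbl 0
    (PySem.Int.floordiv (PySem.List.pyGetD tbl 0 0 + d + speed - 1) speed * speed)

theorem pvOuter (dist : List Int) (speed budget : Int) : ∀ (suf : List Int) (i : Nat),
    i + suf.length = dist.length → dist.drop i = suf →
    (PySem.List.enumerate suf ((i : Int) + 1)).foldl (pvAStep speed)
        (pvRow dist speed budget i dist.length)
      = pvRow dist speed budget dist.length dist.length := by
  intro suf
  induction suf with
  | nil =>
    intro i h1 h2
    have : i = dist.length := by simpa using h1
    subst this
    rw [PySem.List.enumerate_nil, List.foldl_nil]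
  | cons dd rest ih =>
    intro i h1 h2
    have hi : i < dist.length := by
      simp only [List.length_cons] at h1; omega
    have hdd : dd = PySem.List.pyGetD dist (i : Int) 0 := by
      rw [PySem.List.pyGetD_ofNat _ _ _ hi]
      have h3 : (dist.drop i)[0]'(by rw [h2]; simp) = dd := by
        simp [h2]
      rw [List.getElem_drop] at h3
      simp only [Nat.add_zero] at h3
      exact h3.symm
    have hrest : dist.drop (i + 1) = rest := by
      have h4 : dist.drop (i + 1) = (dist.drop i).drop 1 := by
        rw [List.drop_drop]
      rw [h4, h2]
      rfl
    rw [PySem.List.enumerate_cons, List.foldl_cons]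
    have hstep : pvAStep speed (pvRow dist speed budget i dist.length) ((i : Int) + 1, dd)
        = pvRow dist speed budget (i + 1) dist.length := by
      have := pvStep dist speed budget i hi dd hdd
      simpa [pvAStep, pvUpd] using this
    rw [hstep]
    have hcast : (i : Int) + 1 + 1 = ((i + 1 : Nat) : Int) + 1 := by push_cast; ring
    rw [hcast]
    exact ih (i + 1) (by simp only [List.length_cons] at h1; omega) hrest

theorem pvScan (f : Nat → Int) (L : Int) : ∀ (m a : Nat) (acc : Option Int),
    (PySem.List.enumerate ((List.range' a m).map f) (a : Int)).foldl
      (fun acc p => match acc with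
        | some r => some r
        | none => if p.2 ≤ L then some p.1 else none) acc
    = (List.range' a m).foldl
      (fun acc k => match acc with
        | some r => some r
        | none => if f k ≤ L then some (k : Int) else none) acc := by
  intro m
  induction m with
  | zero => intro a acc; simp [PySem.List.enumerate_nil]
  | succ m ih =>
    intro a acc
    rw [List.range'_succ, List.map_cons, PySem.List.enumerate_cons,
        List.foldl_cons, List.foldl_cons]
    have hcast : (a : Int) + 1 = ((a + 1 : Nat) : Int) := by push_cast; ring
    rw [hcast]
    exact ih (a + 1) _

def pvCol (dist : List Int) (speed budget : Int) (k N : Nat) : List Int :=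
  (List.range (N + 1)).map (fun i => pvBest dist speed budget i k)

theorem pvMapRange_get (g : Nat → Int) (m j : Nat) (hj : j < m) :
    PySem.List.pyGetD ((List.range m).map g) (j : Int) 0 = g j := by
  rw [PySem.List.pyGetD_ofNat _ _ _ (by simpa using hj)]
  simp

def pvBInner (speed budget : Int) (prev : List Int) (skips : Nat)
    (row : List Int) (p : Int × Int) : List Int :=
  let i := p.1
  let d := p.2
  if (skips : Int) > i then row ++ [budget]
  else if skips = 0 then
    row ++ [PySem.Int.floordiv (PySem.List.pyGetD row (i - 1) 0 + d + speed - 1) speed * speed]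
  else
    let noSkip := PySem.Int.floordiv (PySem.List.pyGetD row (i - 1) 0 + d + speed - 1) speed * speed
    row ++ [min (PySem.List.pyGetD prev (i - 1) 0 + d) noSkip]

theorem pvBRow_eq (dist : List Int) (speed budget : Int) (k : Nat) (prev : List Int)
    (hk : k = 0 ∨ prev = pvCol dist speed budget (k - 1) dist.length) :
    ∀ (suf : List Int) (i : Nat), i + suf.length = dist.length → dist.drop i = suf →
    (PySem.List.enumerate suf ((i : Int) + 1)).foldl (pvBInner speed budget prev k)
        ((List.range (i + 1)).map (fun i' => pvBest dist speed budget i' k))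
      = pvCol dist speed budget k dist.length := by
  intro suf
  induction suf with
  | nil =>
    intro i h1 h2
    have : i = dist.length := by simpa using h1
    subst this
    rw [PySem.List.enumerate_nil, List.foldl_nil, pvCol]
  | cons dd rest ih =>
    intro i h1 h2
    have hi : i < dist.length := by
      simp only [List.length_cons] at h1; omega
    have hdd : dd = PySem.List.pyGetD dist (i : Int) 0 := by
      rw [PySem.List.pyGetD_ofNat _ _ _ hi]
      have h3 : (dist.drop i)[0]'(by rw [h2]; simp) = dd := by simp [h2]
      rw [List.getElem_drop] at h3
      simp only [Nat.add_zero] at h3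
      exact h3.symm
    have hrest : dist.drop (i + 1) = rest := by
      have h4 : dist.drop (i + 1) = (dist.drop i).drop 1 := by rw [List.drop_drop]
      rw [h4, h2]; rfl
    rw [PySem.List.enumerate_cons, List.foldl_cons]
    have hstep : pvBInner speed budget prev k
        ((List.range (i + 1)).map (fun i' => pvBest dist speed budget i' k))
        ((i : Int) + 1, dd)
        = (List.range (i + 1 + 1)).map (fun i' => pvBest dist speed budget i' k) := by
      have hlast : PySem.List.pyGetD
          ((List.range (i + 1)).map (fun i' => pvBest dist speed budget i' k))
          ((i : Int) + 1 - 1) 0 = pvBest dist speed budget i k := by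
        have : (i : Int) + 1 - 1 = ((i : Nat) : Int) := by ring
        rw [this, pvMapRange_get _ _ _ (by omega)]
      have happ : (List.range (i + 1 + 1)).map (fun i' => pvBest dist speed budget i' k)
          = (List.range (i + 1)).map (fun i' => pvBest dist speed budget i' k)
            ++ [pvBest dist speed budget (i + 1) k] := by
        rw [List.range_succ, List.map_append, List.map_cons, List.map_nil]
      rw [pvBInner]
      by_cases hc1 : (k : Int) > (i : Int) + 1
      · rw [if_pos hc1, happ, pvBest_big _ _ _ _ _ (by omega)]
      · rw [if_neg hc1]
        by_cases hc2 : k = 0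
        · subst hc2
          rw [if_pos rfl, hlast, happ, pvBest]
          rw [if_neg (by omega), if_pos rfl, ← hdd]
        · rw [if_neg hc2]
          rcases hk with hk0 | hprev
          · exact absurd hk0 hc2
          · have hpg : PySem.List.pyGetD prev ((i : Int) + 1 - 1) 0
                = pvBest dist speed budget i (k - 1) := by
              have hc : (i : Int) + 1 - 1 = ((i : Nat) : Int) := by ring
              rw [hc, hprev, pvCol, pvMapRange_get _ _ _ (by omega)]
            rw [hlast, hpg, happ, pvBest]
            rw [if_neg (by omega), if_neg hc2, ← hdd]
    rw [hstep]
    have hcast : (i : Int) + 1 + 1 = ((i + 1 : Nat) : Int) + 1 := by push_cast; ring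
    rw [hcast]
    exact ih (i + 1) (by simp only [List.length_cons] at h1; omega) hrest

theorem pvScanA_foldl_some (g : Nat → Option Int → Option Int)
    (hg : ∀ (r : Int) (k : Nat), g k (some r) = some r) (r : Int) :
    ∀ (l : List Nat), l.foldl (fun acc k => g k acc) (some r) = some r := by
  intro l
  induction l with
  | nil => rfl
  | cons x xs ih => rw [List.foldl_cons, hg]; exact ih

def pvBOuter (dist : List Int) (speed budget : Int) (n : Nat)
    (st : Option Int × List Int) (skips : Nat) : Option Int × List Int :=
  match st.1 with
  | some _ => st
  | none =>
    let row := (PySem.List.enumerate dist 1).foldl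
      (pvBInner speed budget st.2 skips) [if skips = 0 then 0 else budget]
    if PySem.List.pyGetD row (n : Int) 0 ≤ budget then (some (skips : Int), st.2)
    else (none, row)

theorem pvBOuter_foldl_some (dist : List Int) (speed budget : Int) (n : Nat)
    (r : Int) (p : List Int) :
    ∀ (l : List Nat), l.foldl (pvBOuter dist speed budget n) (some r, p) = (some r, p) := by
  intro l
  induction l with
  | nil => rfl
  | cons x xs ih => rw [List.foldl_cons]; exact ih

theorem pvBInit (budget : Int) (dist : List Int) (speed : Int) (a : Nat) :
    [if a = 0 then (0 : Int) else budget]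
      = (List.range (0 + 1)).map (fun i' => pvBest dist speed budget i' a) := by
  cases a with
  | zero => simp [pvBest]
  | succ a => simp [pvBest]

theorem pvBScan (dist : List Int) (speed budget : Int) :
    ∀ (m a : Nat) (prev : List Int),
    (a = 0 ∨ prev = pvCol dist speed budget (a - 1) dist.length) →
    ((List.range' a m).foldl (pvBOuter dist speed budget dist.length) (none, prev)).1
      = (List.range' a m).foldl
          (fun acc k => match acc with
            | some r => some r
            | none => if pvBest dist speed budget dist.length k ≤ budget
                      then some (k : Int) else none) none := by
  intro m
  induction m with
  | zero => intro a prev _; rfl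
  | succ m ih =>
    intro a prev hk
    rw [List.range'_succ, List.foldl_cons, List.foldl_cons]
    have hrow : (PySem.List.enumerate dist 1).foldl
        (pvBInner speed budget prev a) [if a = 0 then 0 else budget]
        = pvCol dist speed budget a dist.length := by
      rw [pvBInit budget dist speed a]
      have h := pvBRow_eq dist speed budget a prev hk dist 0 (by simp) (by simp)
      rw [Nat.cast_zero, zero_add] at h
      exact h
    have hstep : pvBOuter dist speed budget dist.length (none, prev) a
        = if pvBest dist speed budget dist.length a ≤ budget
          then ((some (a : Int), prev) : Option Int × List Int)
          else (none, pvCol dist speed budget a dist.length) := by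
      rw [pvBOuter]
      simp only [hrow]
      rw [pvCol, pvMapRange_get _ _ _ (by omega)]
    rw [hstep]
    by_cases hle : pvBest dist speed budget dist.length a ≤ budget
    · rw [if_pos hle, pvBOuter_foldl_some]
      rw [show (match (none : Option Int) with
          | some r => some r
          | none => if pvBest dist speed budget dist.length a ≤ budget
                    then some ((a : Nat) : Int) else none)
          = if pvBest dist speed budget dist.length a ≤ budget
            then some ((a : Nat) : Int) else none from rfl, if_pos hle]
      exact (pvScanA_foldl_some
        (fun k acc => match acc with
          | some r => some r
          | none => if pvBest dist speed budget dist.length k ≤ budget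
                    then some (k : Int) else none)
        (fun r k => rfl) _ _).symm
    · rw [if_neg hle, if_neg hle]
      exact ih (a + 1) _ (Or.inr (by simp))


theorem min_skips_one_list_main (distance : List Int) (speed : Int) (hours_before : Int) :
    min_skips_one_list distance speed hours_before
      = min_skips_one_list_alt distance speed hours_before := by
  simp only [min_skips_one_list, min_skips_one_list_alt]
  have htable : (PySem.List.enumerate distance 1).foldl
      (fun tbl p =>
        let road_i := p.1
        let d := p.2
        let tbl := (PySem.List.pyRange road_i 0 (-1)).foldl
          (fun t k =>
            PySem.List.pySetD t k
              (min (PySem.List.pyGetD t (k - 1) 0 + d)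
                   (PySem.Int.floordiv (PySem.List.pyGetD t k 0 + d + speed - 1) speed * speed)))
          tbl
        PySem.List.pySetD tbl 0
          (PySem.Int.floordiv (PySem.List.pyGetD tbl 0 0 + d + speed - 1) speed * speed))
      (PySem.List.pySetD (List.replicate (distance.length + 1) (speed * hours_before)) 0 0)
      = pvRow distance speed (speed * hours_before) distance.length distance.length := by
    show (PySem.List.enumerate distance 1).foldl (pvAStep speed)
        (PySem.List.pySetD (List.replicate (distance.length + 1) (speed * hours_before)) 0 0)
        = pvRow distance speed (speed * hours_before) distance.length distance.length
    rw [pvRow_zero distance]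
    have h := pvOuter distance speed (speed * hours_before) distance 0 (by simp) (by simp)
    rw [Nat.cast_zero, zero_add] at h
    exact h
  rw [htable]
  have hrow : pvRow distance speed (speed * hours_before) distance.length distance.length
      = (List.range' 0 (distance.length + 1)).map
          (fun k => pvBest distance speed (speed * hours_before) distance.length k) := by
    rw [pvRow, List.range_eq_range']
  rw [hrow]
  have hscan := pvScan
    (fun k => pvBest distance speed (speed * hours_before) distance.length k)
    (hours_before * speed) (distance.length + 1) 0 none
  rw [Nat.cast_zero] at hscan
  rw [hscan]
  rw [mul_comm hours_before speed]
  have hB : ((List.range (distance.length + 1)).foldl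
      (fun (st : Option Int × List Int) (skips : Nat) =>
        match st.1 with
        | some _ => st
        | none =>
          let row := (PySem.List.enumerate distance 1).foldl
            (fun row p =>
              let i := p.1
              let d := p.2
              if (skips : Int) > i then row ++ [speed * hours_before]
              else if skips = 0 then
                row ++ [PySem.Int.floordiv (PySem.List.pyGetD row (i - 1) 0 + p.2 + speed - 1) speed * speed]
              else
                let noSkip := PySem.Int.floordiv (PySem.List.pyGetD row (i - 1) 0 + d + speed - 1) speed * speed
                row ++ [min (PySem.List.pyGetD st.2 (i - 1) 0 + d) noSkip])
            [if skips = 0 then 0 else speed * hours_before]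
          if PySem.List.pyGetD row ((distance.length : Nat) : Int) 0 ≤ speed * hours_before
          then (some (skips : Int), st.2) else (none, row))
      ((none : Option Int), ([] : List Int))).1
      = (List.range' 0 (distance.length + 1)).foldl
          (fun acc k => match acc with
            | some r => some r
            | none => if pvBest distance speed (speed * hours_before) distance.length k ≤ speed * hours_before
                      then some (k : Int) else none) none := by
    rw [List.range_eq_range']
    exact pvBScan distance speed (speed * hours_before) (distance.length + 1) 0 [] (Or.inl rfl)
  have hB' : (List.foldl
      (fun (st : Option Int × List Int) (skips : Nat) =>
        match st.1 with
        | some _ => st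
        | none =>
          if PySem.List.pyGetD
              (List.foldl
                (fun row p =>
                  if (skips : Int) > p.1 then row ++ [speed * hours_before]
                  else
                    if skips = 0 then
                      row ++ [PySem.Int.floordiv (PySem.List.pyGetD row (p.1 - 1) 0 + p.2 + speed - 1) speed * speed]
                    else
                      row ++ [min (PySem.List.pyGetD st.2 (p.1 - 1) 0 + p.2)
                          (PySem.Int.floordiv (PySem.List.pyGetD row (p.1 - 1) 0 + p.2 + speed - 1) speed * speed)])
                [if skips = 0 then 0 else speed * hours_before] (PySem.List.enumerate distance 1))
              ((distance.length : Nat) : Int) 0 ≤ speed * hours_before then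
            (some (skips : Int), st.2)
          else
            (none,
              List.foldl
                (fun row p =>
                  if (skips : Int) > p.1 then row ++ [speed * hours_before]
                  else
                    if skips = 0 then
                      row ++ [PySem.Int.floordiv (PySem.List.pyGetD row (p.1 - 1) 0 + p.2 + speed - 1) speed * speed]
                    else
                      row ++ [min (PySem.List.pyGetD st.2 (p.1 - 1) 0 + p.2)
                          (PySem.Int.floordiv (PySem.List.pyGetD row (p.1 - 1) 0 + p.2 + speed - 1) speed * speed)])
                [if skips = 0 then 0 else speed * hours_before] (PySem.List.enumerate distance 1)))
      ((none : Option Int), ([] : List Int)) (List.range (distance.length + 1))).1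
      = List.foldl
          (fun acc k =>
            match acc with
            | some r => some r
            | none =>
              if pvBest distance speed (speed * hours_before) distance.length k ≤ speed * hours_before
              then some (k : Int) else none)
          none (List.range' 0 (distance.length + 1)) := hB
  rw [hB']

-- ===== VERDICT (by name: the statement is the Claim_ definition above) =====
theorem min_skips_one_list_spec : Claim_equal_min_skips_one_list := by
  intro distance speed hours_before _ _
  exact min_skips_one_list_main distance speed hours_before
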